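-- pv_equiv track=rewrite | github.com/entwanne/aiorobot | print_piano.py | get_piano_line
-- ===== SOURCE A (Python) =====
-- def get_piano_line(labels, width, char, left_char, right_char, sep_char):
--     line = ''
--     left = True
--
--     for label in labels:
--         if left:
--             line += left_char
--         else:
--             line += sep_char
--         line += label.center(width - 1, char)
--         left = False
--     line += right_char
--     return line
-- ===== SOURCE B (Python) =====
-- def get_piano_line(labels, width, char, left_char, right_char, sep_char):
--     # Structural recursion, assembled tail-first: the line after the first key
--     # is built from the right border backwards, prepending sep + centered label.
--     def tail(ls):
--         if not ls:
--             return right_char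
--         return sep_char + ls[0].center(width - 1, char) + tail(ls[1:])
--
--     if not labels:
--         return right_char
--     return left_char + labels[0].center(width - 1, char) + tail(labels[1:])
-- ===== Notes on version B (the rewrite author's own statement) =====
-- stated objective: alternative
-- what changed: Replaces A's forward accumulator loop with a first-iteration flag by structural recursion that builds the line tail-first from the right border, prepending separator + centered label, with the empty/non-empty split handled once at the top instead of per-iteration.
import Mathlib
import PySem

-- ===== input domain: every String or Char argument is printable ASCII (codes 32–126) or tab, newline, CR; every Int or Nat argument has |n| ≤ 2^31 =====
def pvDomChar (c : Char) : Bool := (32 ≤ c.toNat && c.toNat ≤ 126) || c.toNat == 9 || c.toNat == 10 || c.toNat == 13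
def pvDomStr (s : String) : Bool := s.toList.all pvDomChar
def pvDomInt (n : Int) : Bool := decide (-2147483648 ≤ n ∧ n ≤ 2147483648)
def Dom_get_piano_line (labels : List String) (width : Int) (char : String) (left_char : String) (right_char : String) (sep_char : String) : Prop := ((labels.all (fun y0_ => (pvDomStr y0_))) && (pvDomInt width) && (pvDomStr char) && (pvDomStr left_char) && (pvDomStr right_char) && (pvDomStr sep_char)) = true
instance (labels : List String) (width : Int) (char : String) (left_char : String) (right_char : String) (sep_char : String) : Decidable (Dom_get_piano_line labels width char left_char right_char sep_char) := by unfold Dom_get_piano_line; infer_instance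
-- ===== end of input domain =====

-- B replaces A's forward accumulator loop with a first-iteration flag by structural recursion
-- building the line tail-first from the right border (alternative decomposition; same cost).

-- shared hand port of Python's str.center(w, fill) with a single fill char (exact when fill has
-- length 1; Pre_ guarantees that whenever center is reached): CPython pads m = w - len chars,
-- left = m//2 + (m & w & 1) of them on the left.
def pyCenter (s : List Char) (w : Int) (fill : List Char) : List Char :=
  if w ≤ (s.length : Int) then s
  else
    let c := fill.headD ' '
    let m : Nat := (w - (s.length : Int)).toNat
    let left : Nat := m / 2 + (m &&& w.toNat &&& 1)
    List.replicate left c ++ s ++ List.replicate (m - left) c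

-- ===== PORT A =====
def get_piano_line (labels : List String) (width : Int) (char : String) (left_char : String) (right_char : String) (sep_char : String) : String :=
  let st := labels.foldl (fun (st : List Char × Bool) label =>
      (st.1 ++ (if st.2 then left_char.toList else sep_char.toList)
            ++ pyCenter label.toList (width - 1) char.toList, false))
    ([], true)
  String.ofList (st.1 ++ right_char.toList)

-- ===== PORT B =====
-- recursive helper `tail` of Source B: builds the suffix after the first key, right border first
def pianoTail (w : Int) (ch sep rc : List Char) : List String → List Char
  | [] => rc
  | l :: ls => sep ++ pyCenter l.toList w ch ++ pianoTail w ch sep rc ls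

def get_piano_line_alt (labels : List String) (width : Int) (char : String) (left_char : String) (right_char : String) (sep_char : String) : String :=
  match labels with
  | [] => right_char
  | l :: ls =>
      String.ofList (left_char.toList ++ pyCenter l.toList (width - 1) char.toList
        ++ pianoTail (width - 1) char.toList sep_char.toList right_char.toList ls)

-- ===== PRECONDITION & SPEC =====
-- Pre_ excludes exactly the inputs where Python A raises TypeError: a non-empty label list with a
-- fill char whose length is not 1 (str.center requires a single fill character).
def Pre_get_piano_line (labels : List String) (width : Int) (char : String) (left_char : String) (right_char : String) (sep_char : String) : Prop :=
  labels = [] ∨ char.toList.length = 1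
instance (labels : List String) (width : Int) (char : String) (left_char : String) (right_char : String) (sep_char : String) : Decidable (Pre_get_piano_line labels width char left_char right_char sep_char) := by unfold Pre_get_piano_line; infer_instance

def pvWitness_get_piano_line : List String × Int × String × String × String × String :=
  (["C", "D"], 5, "-", "[", "]", "|")

def Spec_get_piano_line (labels : List String) (width : Int) (char : String) (left_char : String) (right_char : String) (sep_char : String) (out : String) : Prop := out = get_piano_line_alt labels width char left_char right_char sep_char
instance (labels : List String) (width : Int) (char : String) (left_char : String) (right_char : String) (sep_char : String) (out : String) : Decidable (Spec_get_piano_line labels width char left_char right_char sep_char out) := by unfold Spec_get_piano_line; infer_instance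

-- ===== CLAIM (what is proved, stated in full; the proofs are below) =====
def Claim_equal_get_piano_line : Prop := ∀ (labels : List String) (width : Int) (char : String) (left_char : String) (right_char : String) (sep_char : String), Dom_get_piano_line labels width char left_char right_char sep_char → Pre_get_piano_line labels width char left_char right_char sep_char → Spec_get_piano_line labels width char left_char right_char sep_char (get_piano_line labels width char left_char right_char sep_char)

-- ===== LEMMAS AND PROOFS =====

-- A's loop after the first iteration (flag false) appends sep ++ centered label per step;
-- B's pianoTail produces exactly that suffix followed by the right border.
theorem pvFoldA_eq_tail (L sep rc ch : List Char) (w : Int) :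
    ∀ (ls : List String) (acc : List Char),
      (ls.foldl (fun (st : List Char × Bool) label =>
          (st.1 ++ (if st.2 then L else sep) ++ pyCenter label.toList w ch, false)) (acc, false)).1
        ++ rc = acc ++ pianoTail w ch sep rc ls := by
  intro ls
  induction ls with
  | nil => intro acc; simp [pianoTail]
  | cons l ls ih =>
      intro acc
      rw [List.foldl_cons]
      simp only [if_neg Bool.false_ne_true, ih]
      simp [pianoTail, List.append_assoc]

-- ===== VERDICT (by name: the statement is the Claim_ definition above) =====
theorem get_piano_line_spec : Claim_equal_get_piano_line := by
  intro labels width char left_char right_char sep_char _ _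
  unfold Spec_get_piano_line get_piano_line get_piano_line_alt
  cases labels with
  | nil => simp
  | cons l ls =>
      simp only [List.foldl_cons, if_pos rfl]
      rw [String.ofList]
      rw [pvFoldA_eq_tail left_char.toList sep_char.toList right_char.toList char.toList (width - 1) ls]
      simp [List.append_assoc, String.ofList]
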